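-- pv_equiv track=rewrite | github.com/Jozefhdez/plsql-analyzer | analyzer.py | find_declarations_and_usage
-- ===== SOURCE A (Python) =====
-- TYPES = ['NUMBER', 'VARCHAR2', 'INT', 'BOOLEAN']
--
-- def find_declarations_and_usage(lines):
--     declared = set()
--     used = set()
--     warnings = []
--     errors = []
--     in_block = 0
--     after_return = False
--
--     for i, line in enumerate(lines, start=1):
--         stripped_line = line.strip()
--         if not stripped_line or stripped_line.startswith('--'):
--             continue
--
--         tokens = stripped_line.replace(';', ' ;').split()  # handle ; as token
--         tokens_upper = [t.upper() for t in tokens]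
--
--         for j, token in enumerate(tokens_upper):
--             if token in TYPES and j > 0:
--                 var_name = tokens[j - 1].strip(';')
--                 declared.add(var_name.lower())  # add all declared variables
--
--         # check usage by adding used variables
--         # (idx - 1, since we want previous token to ':=' or '=')
--         if ':=' in tokens_upper:
--             idx = tokens_upper.index(':=')
--             used.add(tokens[idx - 1].lower())
--
--         if '=' in tokens_upper:
--             idx = tokens_upper.index('=')
--             used.add(tokens[idx - 1].lower())
--
--         # balance of BEGIN and END
--         if stripped_line.upper().startswith('BEGIN'):
--             in_block += 1
--         if 'END' in tokens_upper:
--             in_block -= 1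
--             if in_block < 0:
--                 errors.append(f'Line {i}: unmatched END.')
--
--         if 'RETURN' in tokens_upper:
--             after_return = True
--         elif after_return:
--             exec_tokens = [t for t in tokens_upper if t not in (
--                 ';', 'END', 'BEGIN', 'RETURN', '/', '')]
--             if exec_tokens:
--                 warnings.append(f'Line {i}: code after RETURN statement.')
--
--     return declared, used, in_block, warnings, errors
-- ===== SOURCE B (Python) =====
-- TYPES = ['NUMBER', 'VARCHAR2', 'INT', 'BOOLEAN']
--
-- def _tokens(line):
--     stripped = line.strip()
--     if not stripped or stripped.startswith('--'):
--         return None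
--     return stripped.replace(';', ' ;').split()
--
-- def find_declarations_and_usage(lines):
--     # Pass 1: declared variables
--     declared = set()
--     for line in lines:
--         tokens = _tokens(line)
--         if tokens is None:
--             continue
--         tokens_upper = [t.upper() for t in tokens]
--         for j, token in enumerate(tokens_upper):
--             if token in TYPES and j > 0:
--                 declared.add(tokens[j - 1].strip(';').lower())
--
--     # Pass 2: used variables (token before ':=' and before '=')
--     used = set()
--     for line in lines:
--         tokens = _tokens(line)
--         if tokens is None:
--             continue
--         tokens_upper = [t.upper() for t in tokens]
--         if ':=' in tokens_upper:
--             used.add(tokens[tokens_upper.index(':=') - 1].lower())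
--         if '=' in tokens_upper:
--             used.add(tokens[tokens_upper.index('=') - 1].lower())
--
--     # Pass 3: BEGIN/END balance and unmatched-END errors
--     in_block = 0
--     errors = []
--     for i, line in enumerate(lines, start=1):
--         tokens = _tokens(line)
--         if tokens is None:
--             continue
--         if line.strip().upper().startswith('BEGIN'):
--             in_block += 1
--         if 'END' in [t.upper() for t in tokens]:
--             in_block -= 1
--             if in_block < 0:
--                 errors.append(f'Line {i}: unmatched END.')
--
--     # Pass 4: sticky after-RETURN flag and warnings
--     after_return = False
--     warnings = []
--     for i, line in enumerate(lines, start=1):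
--         tokens = _tokens(line)
--         if tokens is None:
--             continue
--         tokens_upper = [t.upper() for t in tokens]
--         if 'RETURN' in tokens_upper:
--             after_return = True
--         elif after_return:
--             if [t for t in tokens_upper if t not in (';', 'END', 'BEGIN', 'RETURN', '/', '')]:
--                 warnings.append(f'Line {i}: code after RETURN statement.')
--
--     return declared, used, in_block, warnings, errors
-- ===== Notes on version B (the rewrite author's own statement) =====
-- stated objective: alternative
-- what changed: Replaces A's single combined loop carrying six pieces of state with four independent passes over the lines (declared vars, used vars, BEGIN/END balance with errors, sticky after-RETURN warnings), each maintaining only its own state, plus a shared tokenizer helper.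
import Mathlib
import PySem

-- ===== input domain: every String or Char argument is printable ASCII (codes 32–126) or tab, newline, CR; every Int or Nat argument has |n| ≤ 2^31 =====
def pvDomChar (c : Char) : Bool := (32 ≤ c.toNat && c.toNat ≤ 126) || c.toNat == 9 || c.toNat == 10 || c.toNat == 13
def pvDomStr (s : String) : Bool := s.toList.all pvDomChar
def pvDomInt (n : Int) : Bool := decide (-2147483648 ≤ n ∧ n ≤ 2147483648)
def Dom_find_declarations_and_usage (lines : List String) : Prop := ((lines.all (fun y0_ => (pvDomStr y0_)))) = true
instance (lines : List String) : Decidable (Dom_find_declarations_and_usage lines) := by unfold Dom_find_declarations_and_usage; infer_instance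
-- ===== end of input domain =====

set_option maxHeartbeats 1600000

-- B re-decomposes A's single six-state loop into four independent single-concern passes; return value proved equal, objective: alternative decomposition.

def pvTYPES : List String := ["NUMBER", "VARCHAR2", "INT", "BOOLEAN"]

-- shared guard: blank line or '--' comment (tested identically by both Pythons)
def pvBlank (line : String) : Bool :=
  let stripped := PySem.Str.strip line
  stripped == "" || PySem.Str.startswith stripped "--"

-- ===== PORT A =====
-- state: (declared, used, in_block, after_return, warnings, errors)
def pvStepA (st : PySem.Set String × PySem.Set String × Int × Bool × List String × List String)
    (p : Int × String) : PySem.Set String × PySem.Set String × Int × Bool × List String × List String :=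
  let (declared, used, in_block, after_return, warnings, errors) := st
  let i := p.1
  if pvBlank p.2 then st
  else
    let stripped := PySem.Str.strip p.2
    let tokens := PySem.Str.split₀ (PySem.Str.replace stripped ";" " ;")
    let tokens_upper := tokens.map PySem.Str.upper
    let declared := (PySem.List.enumerate tokens_upper 0).foldl (fun d q =>
      if q.2 ∈ pvTYPES ∧ q.1 > 0 then
        PySem.Set.add d (PySem.Str.lower (PySem.Str.stripChars (PySem.List.pyGetD tokens (q.1 - 1) "") ";"))
      else d) declared
    let used := if ":=" ∈ tokens_upper then
        let idx := ((PySem.List.index? tokens_upper ":=").getD 0 : Int)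
        PySem.Set.add used (PySem.Str.lower (PySem.List.pyGetD tokens (idx - 1) ""))
      else used
    let used := if "=" ∈ tokens_upper then
        let idx := ((PySem.List.index? tokens_upper "=").getD 0 : Int)
        PySem.Set.add used (PySem.Str.lower (PySem.List.pyGetD tokens (idx - 1) ""))
      else used
    let in_block := if PySem.Str.startswith (PySem.Str.upper stripped) "BEGIN" then in_block + 1 else in_block
    -- 'in_block -= 1; if in_block < 0: errors.append(…)' as two scalar updates
    let in_block := if "END" ∈ tokens_upper then in_block - 1 else in_block
    let errors := if "END" ∈ tokens_upper ∧ in_block < 0 then errors ++ ["Line " ++ PySem.Int.toStr i ++ ": unmatched END."] else errors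
    -- 'if RETURN: after_return = True / elif after_return: …' as flag update + guarded append
    let warnings := if "RETURN" ∉ tokens_upper ∧ after_return = true ∧ tokens_upper.filter (fun t => decide (t ∉ [";", "END", "BEGIN", "RETURN", "/", ""])) ≠ [] then warnings ++ ["Line " ++ PySem.Int.toStr i ++ ": code after RETURN statement."] else warnings
    let after_return := if "RETURN" ∈ tokens_upper then true else after_return
    (declared, used, in_block, after_return, warnings, errors)

def find_declarations_and_usage (lines : List String) : List String × List String × Int × List String × List String :=
  let st := (PySem.List.enumerate lines 1).foldl pvStepA (PySem.Set.empty, PySem.Set.empty, 0, false, [], [])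
  (st.1, st.2.1, st.2.2.1, st.2.2.2.2.1, st.2.2.2.2.2)

-- ===== PORT B =====
-- shared tokenizer helper (_tokens in Source B): none = blank or comment line
def pvTokens? (line : String) : Option (List String) :=
  if pvBlank line then none
  else some (PySem.Str.split₀ (PySem.Str.replace (PySem.Str.strip line) ";" " ;"))

-- pass 1 step: declared variables
def pvDecl (d : PySem.Set String) (line : String) : PySem.Set String :=
  match pvTokens? line with
  | none => d
  | some tokens =>
    let tokens_upper := tokens.map PySem.Str.upper
    (PySem.List.enumerate tokens_upper 0).foldl (fun d q =>
      if q.2 ∈ pvTYPES ∧ q.1 > 0 then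
        PySem.Set.add d (PySem.Str.lower (PySem.Str.stripChars (PySem.List.pyGetD tokens (q.1 - 1) "") ";"))
      else d) d

-- pass 2 step: used variables
def pvUsed (u : PySem.Set String) (line : String) : PySem.Set String :=
  match pvTokens? line with
  | none => u
  | some tokens =>
    let tokens_upper := tokens.map PySem.Str.upper
    let u := if ":=" ∈ tokens_upper then
        PySem.Set.add u (PySem.Str.lower (PySem.List.pyGetD tokens (((PySem.List.index? tokens_upper ":=").getD 0 : Int) - 1) ""))
      else u
    if "=" ∈ tokens_upper then
      PySem.Set.add u (PySem.Str.lower (PySem.List.pyGetD tokens (((PySem.List.index? tokens_upper "=").getD 0 : Int) - 1) ""))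
    else u

-- pass 3 step: BEGIN/END balance and unmatched-END errors; state (in_block, errors)
def pvBal (st : Int × List String) (p : Int × String) : Int × List String :=
  match pvTokens? p.2 with
  | none => st
  | some tokens =>
    let tokens_upper := tokens.map PySem.Str.upper
    let in_block := st.1
    let errors := st.2
    let in_block := if PySem.Str.startswith (PySem.Str.upper (PySem.Str.strip p.2)) "BEGIN" then in_block + 1 else in_block
    let in_block := if "END" ∈ tokens_upper then in_block - 1 else in_block
    let errors := if "END" ∈ tokens_upper ∧ in_block < 0 then errors ++ ["Line " ++ PySem.Int.toStr p.1 ++ ": unmatched END."] else errors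
    (in_block, errors)

-- pass 4 step: sticky after-RETURN flag and warnings; state (after_return, warnings)
def pvRet (st : Bool × List String) (p : Int × String) : Bool × List String :=
  match pvTokens? p.2 with
  | none => st
  | some tokens =>
    let tokens_upper := tokens.map PySem.Str.upper
    let after_return := st.1
    let warnings := st.2
    let warnings := if "RETURN" ∉ tokens_upper ∧ after_return = true ∧ tokens_upper.filter (fun t => decide (t ∉ [";", "END", "BEGIN", "RETURN", "/", ""])) ≠ [] then warnings ++ ["Line " ++ PySem.Int.toStr p.1 ++ ": code after RETURN statement."] else warnings
    let after_return := if "RETURN" ∈ tokens_upper then true else after_return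
    (after_return, warnings)

def find_declarations_and_usage_alt (lines : List String) : List String × List String × Int × List String × List String :=
  let declared := lines.foldl pvDecl PySem.Set.empty
  let used := lines.foldl pvUsed PySem.Set.empty
  let bal := (PySem.List.enumerate lines 1).foldl pvBal (0, [])
  let ret := (PySem.List.enumerate lines 1).foldl pvRet (false, [])
  (declared, used, bal.1, ret.2, bal.2)

-- ===== PRECONDITION & SPEC =====
def Spec_find_declarations_and_usage (lines : List String) (out : List String × List String × Int × List String × List String) : Prop := out = find_declarations_and_usage_alt lines
instance (lines : List String) (out : List String × List String × Int × List String × List String) : Decidable (Spec_find_declarations_and_usage lines out) := by unfold Spec_find_declarations_and_usage; infer_instance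

-- ===== CLAIM (what is proved, stated in full; the proofs are below) =====
def Claim_equal_find_declarations_and_usage : Prop := ∀ (lines : List String), Dom_find_declarations_and_usage lines → Spec_find_declarations_and_usage lines (find_declarations_and_usage lines)

-- ===== LEMMAS AND PROOFS =====

theorem pvTokens?_pos (x : String) (h : pvBlank x = true) : pvTokens? x = none := by
  simp [pvTokens?, h]

theorem pvTokens?_neg (x : String) (h : pvBlank x = false) :
    pvTokens? x = some (PySem.Str.split₀ (PySem.Str.replace (PySem.Str.strip x) ";" " ;")) := by
  simp [pvTokens?, h]

-- A's loop step is exactly the four pass steps run componentwise on their own slices of the state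
theorem pvStep_decomp (i : Int) (x : String)
    (d u : PySem.Set String) (b : Int) (ar : Bool) (w e : List String) :
    pvStepA (d, u, b, ar, w, e) (i, x) =
      (pvDecl d x, pvUsed u x, (pvBal (b, e) (i, x)).1, (pvRet (ar, w) (i, x)).1,
       (pvRet (ar, w) (i, x)).2, (pvBal (b, e) (i, x)).2) := by
  cases h : pvBlank x with
  | true =>
    simp only [pvStepA, pvDecl, pvUsed, pvBal, pvRet, pvTokens?_pos x h, h, if_true]
  | false =>
    simp only [pvStepA, pvDecl, pvUsed, pvBal, pvRet, pvTokens?_neg x h, h,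
      Bool.false_eq_true, if_false]

-- the combined fold equals the tuple of the four independent folds
theorem pv_fold_decomp (lines : List String) (i : Int)
    (d u : PySem.Set String) (b : Int) (ar : Bool) (w e : List String) :
    (PySem.List.enumerate lines i).foldl pvStepA (d, u, b, ar, w, e) =
      (lines.foldl pvDecl d, lines.foldl pvUsed u,
       ((PySem.List.enumerate lines i).foldl pvBal (b, e)).1,
       ((PySem.List.enumerate lines i).foldl pvRet (ar, w)).1,
       ((PySem.List.enumerate lines i).foldl pvRet (ar, w)).2,
       ((PySem.List.enumerate lines i).foldl pvBal (b, e)).2) := by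
  induction lines generalizing i d u b ar w e with
  | nil => simp [PySem.List.enumerate_nil]
  | cons x xs ih =>
    simp only [PySem.List.enumerate_cons, List.foldl_cons, pvStep_decomp]
    rw [ih]

-- ===== VERDICT (by name: the statement is the Claim_ definition above) =====
theorem find_declarations_and_usage_spec : Claim_equal_find_declarations_and_usage := by
  intro lines _
  unfold Spec_find_declarations_and_usage find_declarations_and_usage find_declarations_and_usage_alt
  rw [pv_fold_decomp]
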